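-- pv_equiv track=rewrite | github.com/Chinchill-AI/chat-sdk-python | src/chat_sdk/adapters/telegram/adapter.py | _find_unescaped_positions_outside_code
-- ===== SOURCE A (Python) =====
-- def _find_unescaped_positions_outside_code(text: str, marker: str) -> list[int]:
--     """Like :func:`find_unescaped_positions` but skips occurrences inside
--     fenced code blocks (```````) or inline code spans
--     (`````). Inside those regions Telegram treats ``*``, ``_``, ``~``,
--     ``[``, ``]`` as literal text.
--
--     Port of upstream ``findUnescapedPositionsOutsideCode`` (chat#446).
--     """
--     positions: list[int] = []
--     in_fence = False
--     in_inline = False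
--     backslashes = 0
--     i = 0
--     n = len(text)
--     while i < n:
--         ch = text[i]
--
--         if ch == "\\":
--             backslashes += 1
--             i += 1
--             continue
--
--         escaped = backslashes % 2 == 1
--         backslashes = 0
--
--         if ch == "`" and not escaped:
--             is_triple = text[i + 1 : i + 2] == "`" and text[i + 2 : i + 3] == "`"
--             if is_triple and not in_inline:
--                 in_fence = not in_fence
--                 i += 3
--                 continue
--             if not in_fence:
--                 in_inline = not in_inline
--             i += 1
--             continue
--
--         if ch == marker and not escaped and not in_fence and not in_inline:
--             positions.append(i)
--         i += 1
--
--     return positions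
-- ===== SOURCE B (Python) =====
-- def _find_unescaped_positions_outside_code(text: str, marker: str) -> list[int]:
--     """Two-phase rewrite: first collect the half-open [start, end) index
--     ranges covered by fenced/inline code (an unterminated region stays open
--     to end of text), then independently scan for unescaped marker
--     occurrences and keep those outside every range.  Backticks are
--     structural and never reported (the backtick branch precedes the marker
--     check), so marker == "`" yields nothing."""
--     if marker == "`":
--         return []
--     # Phase 1: code ranges.
--     intervals = []
--     start = 0
--     in_fence = in_inline = False
--     backslashes = 0
--     i = 0
--     n = len(text)
--     while i < n:
--         ch = text[i]
--         if ch == "\\":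
--             backslashes += 1
--             i += 1
--             continue
--         escaped = backslashes % 2 == 1
--         backslashes = 0
--         if ch == "`" and not escaped:
--             is_triple = text[i + 1 : i + 2] == "`" and text[i + 2 : i + 3] == "`"
--             if is_triple and not in_inline:
--                 if in_fence:
--                     intervals.append((start, i + 3))
--                 else:
--                     start = i
--                 in_fence = not in_fence
--                 i += 3
--                 continue
--             if not in_fence:
--                 if in_inline:
--                     intervals.append((start, i + 1))
--                 else:
--                     start = i
--                 in_inline = not in_inline
--             i += 1
--             continue
--         i += 1
--     if in_fence or in_inline:
--         intervals.append((start, i))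
--     # Phase 2: unescaped marker occurrences outside all code ranges.
--     positions = []
--     parity = 0
--     for j, ch in enumerate(text):
--         if ch == "\\":
--             parity ^= 1
--             continue
--         if ch == marker and parity == 0 and not any(s <= j < e for s, e in intervals):
--             positions.append(j)
--         parity = 0
--     return positions
-- ===== Notes on version B (the rewrite author's own statement) =====
-- stated objective: alternative
-- what changed: Replaces A's single stateful scan that records positions on the fly by a two-phase decomposition: one pass collects the half-open [start,end) code-span ranges (fenced or inline, unterminated ranges closed at end of text), and an independent second pass finds unescaped marker occurrences by backslash parity and keeps those lying outside every recorded range.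
import Mathlib
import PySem

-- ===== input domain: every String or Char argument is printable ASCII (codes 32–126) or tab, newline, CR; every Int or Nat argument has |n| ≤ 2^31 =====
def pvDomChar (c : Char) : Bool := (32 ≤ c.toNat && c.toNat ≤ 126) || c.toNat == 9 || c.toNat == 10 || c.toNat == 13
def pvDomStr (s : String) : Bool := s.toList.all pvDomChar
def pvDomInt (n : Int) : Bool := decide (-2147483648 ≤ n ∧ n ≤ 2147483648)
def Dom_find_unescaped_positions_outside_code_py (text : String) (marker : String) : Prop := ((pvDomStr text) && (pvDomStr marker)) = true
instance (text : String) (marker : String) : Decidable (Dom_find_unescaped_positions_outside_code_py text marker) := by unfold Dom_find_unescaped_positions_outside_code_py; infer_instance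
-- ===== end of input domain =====

-- B replaces A's single stateful scan by two passes — collect the code [start,end) ranges,
-- then scan for unescaped markers outside all ranges — as a different decomposition (same cost class).

-- ===== PORT A =====
-- is_triple: text[i+1:i+2] == "`" and text[i+2:i+3] == "`", i.e. the next two characters
-- of the remainder are both backticks (exact: the slices have length ≤ 1).
def pvTriple : List Char → Bool
  | a :: b :: _ => a = '`' && b = '`'
  | _ => false

-- A's while loop over text: recursion on the remaining characters, i the current index.
def pvLoopA (marker : String) : List Char → Int → Bool → Bool → Nat → List Int
  | [], _, _, _, _ => []
  | c :: rest, i, fence, inl, bs =>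
    if c = '\\' then pvLoopA marker rest (i+1) fence inl (bs+1)
    else
      let escaped := bs % 2 = 1
      if c = '`' ∧ ¬escaped then
        if pvTriple rest ∧ ¬inl then pvLoopA marker (rest.drop 2) (i+3) (!fence) inl 0
        else if ¬fence then pvLoopA marker rest (i+1) fence (!inl) 0
        else pvLoopA marker rest (i+1) fence inl 0
      else
        if String.ofList [c] = marker ∧ ¬escaped ∧ ¬fence ∧ ¬inl then
          i :: pvLoopA marker rest (i+1) fence inl 0
        else pvLoopA marker rest (i+1) fence inl 0
termination_by cs => cs.length
decreasing_by all_goals simp [List.length_drop]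

def find_unescaped_positions_outside_code_py (text : String) (marker : String) : List Int :=
  pvLoopA marker text.toList 0 false false 0

-- ===== PORT B =====
-- Phase 1 of Source B: same walk, but recording the half-open code ranges (start, end);
-- at end of text (the [] case, where the index equals len(text)) an open range is closed at i.
def pvLoopI : List Char → Int → Bool → Bool → Nat → Int → List (Int × Int)
  | [], i, fence, inl, _, start => if fence || inl then [(start, i)] else []
  | c :: rest, i, fence, inl, bs, start =>
    if c = '\\' then pvLoopI rest (i+1) fence inl (bs+1) start
    else
      let escaped := bs % 2 = 1
      if c = '`' ∧ ¬escaped then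
        if pvTriple rest ∧ ¬inl then
          if fence then (start, i+3) :: pvLoopI (rest.drop 2) (i+3) (!fence) inl 0 start
          else pvLoopI (rest.drop 2) (i+3) (!fence) inl 0 i
        else if ¬fence then
          if inl then (start, i+1) :: pvLoopI rest (i+1) fence (!inl) 0 start
          else pvLoopI rest (i+1) fence (!inl) 0 i
        else pvLoopI rest (i+1) fence inl 0 start
      else pvLoopI rest (i+1) fence inl 0 start
termination_by cs => cs.length
decreasing_by all_goals simp [List.length_drop]

-- Phase 2 of Source B: enumerate(text), parity of the preceding backslash run, keep unescaped
-- marker occurrences outside every recorded range ('any' over the interval list).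
def pvLoopP (marker : String) (ivs : List (Int × Int)) : List Char → Int → Nat → List Int
  | [], _, _ => []
  | c :: rest, j, parity =>
    if c = '\\' then pvLoopP marker ivs rest (j+1) (parity ^^^ 1)
    else
      if String.ofList [c] = marker ∧ parity = 0 ∧ ¬(ivs.any fun se => se.1 ≤ j ∧ j < se.2) then
        j :: pvLoopP marker ivs rest (j+1) 0
      else pvLoopP marker ivs rest (j+1) 0

def find_unescaped_positions_outside_code_py_alt (text : String) (marker : String) : List Int :=
  if marker = "`" then []
  else pvLoopP marker (pvLoopI text.toList 0 false false 0 0) text.toList 0 0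

-- ===== PRECONDITION & SPEC =====
def Spec_find_unescaped_positions_outside_code_py (text : String) (marker : String) (out : List Int) : Prop := out = find_unescaped_positions_outside_code_py_alt text marker
instance (text : String) (marker : String) (out : List Int) : Decidable (Spec_find_unescaped_positions_outside_code_py text marker out) := by unfold Spec_find_unescaped_positions_outside_code_py; infer_instance

-- ===== CLAIM (what is proved, stated in full; the proofs are below) =====
def Claim_equal_find_unescaped_positions_outside_code_py : Prop := ∀ (text : String) (marker : String), Dom_find_unescaped_positions_outside_code_py text marker → Spec_find_unescaped_positions_outside_code_py text marker (find_unescaped_positions_outside_code_py text marker)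

-- ===== LEMMAS AND PROOFS =====

-- When marker is the backtick itself, A never records: unescaped backticks take the
-- backtick branch, escaped ones fail the ¬escaped test.
theorem pvLoopA_backtick : ∀ (cs : List Char) (i : Int) (f il : Bool) (bs : Nat),
    pvLoopA "`" cs i f il bs = [] := by
  intro cs i f il bs
  fun_induction pvLoopA "`" cs i f il bs <;>
    simp_all [String.ext_iff]

-- Every range produced from the current state starts at st (when already inside code)
-- or at/after the current index (when outside).
theorem pvLoopI_ge : ∀ (cs : List Char) (i : Int) (f il : Bool) (bs : ℕ) (st : Int),
    st ≤ i → ∀ p ∈ pvLoopI cs i f il bs st, st ≤ p.1 ∧ ((f || il) = false → i ≤ p.1) := by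
  intro cs i f il bs st
  fun_induction pvLoopI cs i f il bs st
  all_goals intro hst p hp
  all_goals try rw [List.mem_cons] at hp
  all_goals try rcases hp with rfl | hp
  all_goals try (solve | simp_all | (refine ⟨by simp, ?_⟩; intros; simp_all))
  all_goals rename_i ih
  all_goals obtain ⟨h1, h2⟩ := ih (by omega) p hp
  all_goals refine ⟨by omega, ?_⟩
  all_goals intros
  all_goals try simp_all
  all_goals omega

-- Inside code, the first recorded range is (st, e) with i ≤ e.
theorem pvLoopI_open : ∀ (cs : List Char) (i : Int) (f il : Bool) (bs : ℕ) (st : Int),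
    (f || il) = true →
    ∃ e tail, pvLoopI cs i f il bs st = (st, e) :: tail ∧ i ≤ e := by
  intro cs i f il bs st h
  fun_induction pvLoopI cs i f il bs st <;> simp_all <;>
    (try (rename_i ih; obtain ⟨e, he, hl⟩ := ih; exact ⟨e, he, by omega⟩))

-- A range entirely before the current index never affects phase 2.
theorem pvLoopP_drop (marker : String) (s e : Int) (ivs : List (Int × Int)) :
    ∀ (cs : List Char) (j : Int) (p : ℕ), e ≤ j →
    pvLoopP marker ((s, e) :: ivs) cs j p = pvLoopP marker ivs cs j p := by
  intro cs
  induction cs with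
  | nil => intro j p h; simp [pvLoopP]
  | cons c rest ih =>
    intro j p h
    have h0 : ¬((s : Int) ≤ j ∧ j < e) := by omega
    simp only [pvLoopP, List.any_cons, h0, decide_false, Bool.false_or]
    split
    · exact ih (j+1) _ (by omega)
    · split <;> simp [ih (j+1) 0 (by omega)]

-- One pvLoopP step over a backtick (marker ≠ "`"): no record, parity resets.
theorem pvLoopP_tick (marker : String) (hm : marker ≠ "`") (ivs : List (Int × Int))
    (rest : List Char) (j : Int) (p : ℕ) :
    pvLoopP marker ivs ('`' :: rest) j p = pvLoopP marker ivs rest (j+1) 0 := by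
  have h1 : ¬ ('`' : Char) = '\\' := by decide
  have h2 : ¬ String.ofList ['`'] = marker := by
    intro h; exact hm (by rw [← h])
  simp [pvLoopP, h1, h2]

-- pvTriple characterisation.
theorem pvTriple_eq : ∀ (l : List Char), pvTriple l = true → ∃ r, l = '`' :: '`' :: r := by
  intro l h
  rcases l with _ | ⟨a, _ | ⟨b, r⟩⟩ <;> simp [pvTriple] at h
  exact ⟨r, by simp [h.1, h.2]⟩

-- Backslash-run parity step.
theorem pvParity (bs : ℕ) : bs % 2 ^^^ 1 = (bs + 1) % 2 := by
  rcases Nat.mod_two_eq_zero_or_one bs with h | h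
  · have e : (bs + 1) % 2 = 1 := by omega
    rw [h, e]; decide
  · have e : (bs + 1) % 2 = 0 := by omega
    rw [h, e]; decide

-- Main invariant: from any state, A's remaining scan equals phase 2 run on the ranges
-- phase 1 produces from that state.
theorem pvMain (marker : String) (hm : marker ≠ "`") :
    ∀ (cs : List Char) (i : Int) (f il : Bool) (bs : ℕ), ∀ (st : Int), st ≤ i →
    pvLoopP marker (pvLoopI cs i f il bs st) cs i (bs % 2) = pvLoopA marker cs i f il bs := by
  intro cs i f il bs
  fun_induction pvLoopA marker cs i f il bs with
  | case1 => intro st hst; simp [pvLoopP]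
  | case2 rest i f il bs ih =>
    intro st hst
    simp only [pvLoopI, pvLoopP, pvParity bs]
    exact ih st (by omega)
  | case3 c rest i f il bs hnb esc hc ht ih =>
    intro st hst
    obtain ⟨htr, hin⟩ := ht
    have hin' : il = false := by simpa using hin
    obtain ⟨rest2, hr2⟩ := pvTriple_eq rest htr
    obtain ⟨hcq, hesc⟩ := hc
    have hesc' : ¬ (bs % 2 = 1) := hesc
    subst hcq hr2 hin'
    have hI : pvLoopI ('`' :: '`' :: '`' :: rest2) i f false bs st =
        if f then (st, i+3) :: pvLoopI rest2 (i+3) (!f) false 0 st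
        else pvLoopI rest2 (i+3) (!f) false 0 i := by
      simp [pvLoopI, hesc', pvTriple]
    have e3 : (i + 1 + 1 + 1 : Int) = i + 3 := by ring
    have ihd : ∀ st', st' ≤ i + 3 →
        pvLoopP marker (pvLoopI rest2 (i+3) (!f) false 0 st') rest2 (i+3) 0 =
        pvLoopA marker rest2 (i+3) (!f) false 0 := by
      intro st' h'
      have := ih st' h'
      simpa using this
    rw [hI]
    by_cases hf : f = true
    · simp only [if_pos hf]
      rw [pvLoopP_tick marker hm, pvLoopP_tick marker hm, pvLoopP_tick marker hm, e3]
      rw [pvLoopP_drop marker st (i+3) _ rest2 (i+3) 0 le_rfl]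
      exact ihd st (by omega)
    · simp only [if_neg hf]
      rw [pvLoopP_tick marker hm, pvLoopP_tick marker hm, pvLoopP_tick marker hm, e3]
      exact ihd i (by omega)
  | case4 c rest i f il bs hnb esc hc hnt hnf ih =>
    intro st hst
    obtain ⟨hcq, hesc⟩ := hc
    have hesc' : ¬ (bs % 2 = 1) := hesc
    have hf' : f = false := by simpa using hnf
    subst hcq hf'
    have hI : pvLoopI ('`' :: rest) i false il bs st =
        if il then (st, i+1) :: pvLoopI rest (i+1) false (!il) 0 st
        else pvLoopI rest (i+1) false (!il) 0 i := by
      simp only [pvLoopI, if_neg (by decide : ¬ ('`' : Char) = '\\')]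
      rw [if_pos (by exact ⟨trivial, hesc'⟩)]
      rw [if_neg (by simpa [pvTriple] using hnt), if_pos (by simp)]
    have ihd : ∀ st', st' ≤ i + 1 →
        pvLoopP marker (pvLoopI rest (i+1) false (!il) 0 st') rest (i+1) 0 =
        pvLoopA marker rest (i+1) false (!il) 0 := by
      intro st' h'
      simpa using ih st' h'
    rw [hI]
    by_cases hil : il = true
    · simp only [if_pos hil]
      rw [pvLoopP_tick marker hm]
      rw [pvLoopP_drop marker st (i+1) _ rest (i+1) 0 le_rfl]
      exact ihd st (by omega)
    · simp only [if_neg hil]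
      rw [pvLoopP_tick marker hm]
      exact ihd i (by omega)
  | case5 c rest i f il bs hnb esc hc hnt hf ih =>
    intro st hst
    obtain ⟨hcq, hesc⟩ := hc
    have hesc' : ¬ (bs % 2 = 1) := hesc
    have hf' : f = true := by simpa using hf
    subst hcq hf'
    have hI : pvLoopI ('`' :: rest) i true il bs st = pvLoopI rest (i+1) true il 0 st := by
      simp only [pvLoopI, if_neg (by decide : ¬ ('`' : Char) = '\\')]
      rw [if_pos (by exact ⟨trivial, hesc'⟩)]
      rw [if_neg (by simpa [pvTriple] using hnt), if_neg (by simp)]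
    rw [hI, pvLoopP_tick marker hm]
    simpa using ih st (by omega)
  | case6 c rest i f il bs hnb esc hnc h ih =>
    intro st hst
    obtain ⟨hmk, hesc, hfp, hilp⟩ := h
    have hesc' : bs % 2 = 0 := by have : ¬ (bs % 2 = 1) := hesc; omega
    have hf' : f = false := by simpa using hfp
    have hil' : il = false := by simpa using hilp
    subst hf' hil'
    have hI : pvLoopI (c :: rest) i false false bs st = pvLoopI rest (i+1) false false 0 st := by
      simp only [pvLoopI, if_neg hnb]
      rw [if_neg hnc]
    have hany : ((pvLoopI rest (i+1) false false 0 st).any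
        fun se => decide (se.1 ≤ i ∧ i < se.2)) = false := by
      rw [List.any_eq_false]
      intro p hp
      have := (pvLoopI_ge rest (i+1) false false 0 st (by omega) p hp).2 (by simp)
      simp only [decide_eq_true_eq]
      omega
    rw [hI]
    simp only [pvLoopP, if_neg hnb]
    have hnotany : ¬ (((pvLoopI rest (i+1) false false 0 st).any
        fun se => decide (se.1 ≤ i ∧ i < se.2)) = true) := by
      rw [hany]; decide
    rw [if_pos (by exact ⟨hmk, hesc', hnotany⟩)]
    have := ih st (by omega)
    simp only [Nat.zero_mod] at this
    rw [this]
  | case7 c rest i f il bs hnb esc hnc h ih =>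
    intro st hst
    have hI : pvLoopI (c :: rest) i f il bs st = pvLoopI rest (i+1) f il 0 st := by
      simp only [pvLoopI, if_neg hnb]
      rw [if_neg hnc]
    rw [hI]
    simp only [pvLoopP, if_neg hnb]
    rw [if_neg ?hcnd]
    case hcnd =>
      by_cases hcode : (f || il) = true
      · obtain ⟨e, tl, hEq, hle⟩ := pvLoopI_open rest (i+1) f il 0 st hcode
        intro hcond
        apply hcond.2.2
        rw [hEq]
        simp only [List.any_cons, Bool.or_eq_true, decide_eq_true_eq]
        left
        constructor <;> omega
      · intro hcond
        have hpar : bs % 2 = 0 := hcond.2.1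
        exact h ⟨hcond.1, fun he => by have : bs % 2 = 1 := he; omega,
          by simp_all, by simp_all⟩
    have := ih st (by omega)
    simpa using this

-- ===== VERDICT (by name: the statement is the Claim_ definition above) =====
theorem find_unescaped_positions_outside_code_py_spec : Claim_equal_find_unescaped_positions_outside_code_py := by
  intro text marker _
  unfold Spec_find_unescaped_positions_outside_code_py
  unfold find_unescaped_positions_outside_code_py find_unescaped_positions_outside_code_py_alt
  by_cases hm : marker = "`"
  · subst hm; simp [pvLoopA_backtick]
  · simp only [if_neg hm]
    exact (pvMain marker hm text.toList 0 false false 0 0 le_rfl).symm
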